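-- pv_equiv track=rewrite | github.com/hwmaltby/project-euler | problems/problem_117.py | counting_block_combinations
-- ===== SOURCE A (Python) =====
-- def counting_block_combinations(n, lst):
--     """
--     Returns the number of possible block combinations of length n with
--     minimal red block length m.
--     """
--     num_ways = [0] * (n + 1)
--     num_ways[0] = 1
--     for i in range(1, n + 1):
--         num_ways[i] += num_ways[i - 1]
--         for m in lst:
--             if m <= i:
--                 num_ways[i] += num_ways[i - m]
--     return num_ways[n]
-- ===== SOURCE B (Python) =====
-- def counting_block_combinations(n, lst):
--     """
--     Returns the number of possible block combinations of length n with
--     minimal red block length m.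
--
--     Top-down memoized recursion: f(i) = 1 if i == 0 else
--     f(i-1) + sum(f(i-m) for m in lst if m <= i), each state computed once,
--     on demand.  The memo is warmed in strides of 400 so the recursion stays
--     shallow (f(j) only recurses down to the previously memoized region),
--     avoiding Python's recursion limit without importing sys.
--     """
--     memo = {}
--
--     def f(i):
--         if i == 0:
--             return 1
--         if i in memo:
--             return memo[i]
--         total = f(i - 1)
--         for m in lst:
--             if m <= i:
--                 total += f(i - m)
--         memo[i] = total
--         return total
--
--     for j in range(0, n + 1, 400):
--         f(j)
--     return f(n)
-- ===== Notes on version B (the rewrite author's own statement) =====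
-- stated objective: alternative
-- what changed: Replaces A's bottom-up table DP (a list filled left to right by two nested loops) with a top-down memoized recursion f(i) = f(i-1) + sum(f(i-m) for m in lst if m <= i) over a dict, computing each state once on demand from n downward.
-- outside the precondition, e.g. on counting_block_combinations(2, [0]): A returns 4, B raises RecursionError; on counting_block_combinations(2, [-1]): A raises IndexError, B raises
import Mathlib
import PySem

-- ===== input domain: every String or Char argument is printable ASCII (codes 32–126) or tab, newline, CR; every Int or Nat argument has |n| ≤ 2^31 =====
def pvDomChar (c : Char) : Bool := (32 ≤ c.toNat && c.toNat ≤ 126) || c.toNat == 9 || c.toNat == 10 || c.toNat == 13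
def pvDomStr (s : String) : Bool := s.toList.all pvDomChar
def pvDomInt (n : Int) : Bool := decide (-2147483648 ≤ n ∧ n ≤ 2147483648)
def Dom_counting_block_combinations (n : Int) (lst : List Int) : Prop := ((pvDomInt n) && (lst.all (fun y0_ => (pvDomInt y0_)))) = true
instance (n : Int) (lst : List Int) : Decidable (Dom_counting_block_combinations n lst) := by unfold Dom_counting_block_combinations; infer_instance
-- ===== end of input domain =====

-- B replaces A's bottom-up table DP by a top-down memoized recursion over a dict
-- (warmed in strides so the Python recursion stays shallow); objective: alternative.

-- ===== PORT A =====
def counting_block_combinations (n : Int) (lst : List Int) : Int :=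
  let num_ways := List.replicate (n + 1).toNat (0 : Int)
  -- num_ways[0] = 1 (Python raises IndexError here when n < 0; excluded by Pre_)
  let num_ways := PySem.List.pySetD num_ways 0 1
  let num_ways := (PySem.List.pyRange 1 (n + 1) 1).foldl (fun nw i =>
    let nw := PySem.List.pySetD nw i (PySem.List.pyGetD nw i 0 + PySem.List.pyGetD nw (i - 1) 0)
    lst.foldl (fun nw m =>
      if m ≤ i then
        PySem.List.pySetD nw i (PySem.List.pyGetD nw i 0 + PySem.List.pyGetD nw (i - m) 0)
      else nw) nw) num_ways
  PySem.List.pyGetD num_ways n 0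

-- ===== PORT B =====
-- the inner recursive function f of Source B, threading the memo dict; the Nat
-- argument is a fuel/totality guard only (Python's f diverges where it runs out,
-- which cannot happen under Pre_: each call strictly decreases i with fuel > i)
def fMemo (lst : List Int) : Nat → Int → PySem.Dict Int Int → Int × PySem.Dict Int Int
  | 0, _, memo => (0, memo)
  | fuel + 1, i, memo =>
    if i = 0 then (1, memo)
    else
      match PySem.Dict.get? memo i with
      | some v => (v, memo)
      | none =>
        let p := fMemo lst fuel (i - 1) memo
        let q := lst.foldl (fun (p : Int × PySem.Dict Int Int) m =>
            if m ≤ i then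
              let r := fMemo lst fuel (i - m) p.2
              (p.1 + r.1, r.2)
            else p) p
        (q.1, PySem.Dict.insert q.2 i q.1)

def counting_block_combinations_alt (n : Int) (lst : List Int) : Int :=
  -- for j in range(0, n + 1, 400): f(j)   (return value discarded, memo grows)
  let memo := (PySem.List.pyRange 0 (n + 1) 400).foldl
      (fun memo j => (fMemo lst (j.toNat + 1) j memo).2) PySem.Dict.empty
  (fMemo lst (n.toNat + 1) n memo).1

-- ===== PRECONDITION & SPEC =====
-- Pre_ excludes negative n and, for n ≥ 1, lists containing a block length ≤ 0:
-- A raises IndexError on negative n and on negative block lengths; for a zero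
-- block length A returns a value doubled mid-loop by its in-place accumulation
-- (an artifact of its evaluation order) while B's recursion does not terminate.
def Pre_counting_block_combinations (n : Int) (lst : List Int) : Prop :=
  0 ≤ n ∧ (n = 0 ∨ ∀ m ∈ lst, 1 ≤ m)
instance (n : Int) (lst : List Int) : Decidable (Pre_counting_block_combinations n lst) := by
  unfold Pre_counting_block_combinations; infer_instance

def pvWitness_counting_block_combinations : Int × List Int := (7, [2, 3])

def Spec_counting_block_combinations (n : Int) (lst : List Int) (out : Int) : Prop :=
  out = counting_block_combinations_alt n lst
instance (n : Int) (lst : List Int) (out : Int) : Decidable (Spec_counting_block_combinations n lst out) := by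
  unfold Spec_counting_block_combinations; infer_instance

-- ===== CLAIM (what is proved, stated in full; the proofs are below) =====
def Claim_equal_counting_block_combinations : Prop :=
  ∀ (n : Int) (lst : List Int), Dom_counting_block_combinations n lst →
    Pre_counting_block_combinations n lst →
    Spec_counting_block_combinations n lst (counting_block_combinations n lst)

-- ===== LEMMAS AND PROOFS =====

-- ---- the common mathematical table g: g lst k = number of tilings of length k ----
def gTab (lst : List Int) : Nat → List Int
  | 0 => [1]
  | k + 1 =>
    let prev := gTab lst k
    (prev.headD 0 + lst.foldl (fun a m =>
        a + (if 1 ≤ m ∧ m ≤ (k : Int) + 1 then prev.getD (m.toNat - 1) 0 else 0)) 0) :: prev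

def g (lst : List Int) (k : Nat) : Int := (gTab lst k).headD 0

def sTerm (lst : List Int) (k : Nat) : Int :=
  (lst.map (fun m => if 1 ≤ m ∧ m ≤ (k : Int) + 1 then g lst (k + 1 - m.toNat) else 0)).sum

lemma foldl_add_eq_sum_map (f : Int → Int) :
    ∀ (l : List Int) (a : Int), l.foldl (fun a m => a + f m) a = a + (l.map f).sum := by
  intro l
  induction l with
  | nil => simp
  | cons m l ih => intro a; simp [List.foldl_cons, ih, add_assoc]

lemma gTab_succ (lst : List Int) (k : Nat) : gTab lst (k + 1) = g lst (k + 1) :: gTab lst k := by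
  simp [g, gTab]

lemma gTab_getD (lst : List Int) : ∀ (k j : Nat), j ≤ k → (gTab lst k).getD j 0 = g lst (k - j) := by
  intro k
  induction k with
  | zero => intro j hj; interval_cases j; simp [g, gTab]
  | succ k ih =>
    intro j hj
    rw [gTab_succ]
    cases j with
    | zero => simp
    | succ j => simpa using ih j (by omega)

lemma g_succ (lst : List Int) (k : Nat) : g lst (k + 1) = g lst k + sTerm lst k := by
  show (gTab lst (k+1)).headD 0 = _
  simp only [gTab, List.headD_cons]
  rw [foldl_add_eq_sum_map]
  have hmap : (List.map (fun m => if 1 ≤ m ∧ m ≤ (k:Int) + 1 then (gTab lst k).getD (m.toNat - 1) 0 else 0) lst)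
      = (List.map (fun m => if 1 ≤ m ∧ m ≤ (k:Int) + 1 then g lst (k + 1 - m.toNat) else 0) lst) := by
    apply List.map_congr_left
    intro m _
    by_cases h : 1 ≤ m ∧ m ≤ (k : Int) + 1
    · rw [if_pos h, if_pos h, gTab_getD lst k (m.toNat - 1) (by omega)]
      congr 1
      omega
    · rw [if_neg h, if_neg h]
  rw [show ((gTab lst k).headD 0) = g lst k from rfl]
  unfold sTerm
  rw [← hmap]
  ring

-- middle-cell list lemmas (A side)
lemma mid_getD : ∀ (pre : List Int) (acc : Int) (rep : List Int),
    (pre ++ acc :: rep).getD pre.length 0 = acc := by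
  intro pre
  induction pre with
  | nil => intro acc rep; rfl
  | cons x pre ih => intro acc rep; simp only [List.cons_append, List.length_cons, List.getD_cons_succ]; exact ih acc rep

lemma mid_set : ∀ (pre : List Int) (acc v : Int) (rep : List Int),
    (pre ++ acc :: rep).set pre.length v = pre ++ v :: rep := by
  intro pre
  induction pre with
  | nil => intro acc v rep; rfl
  | cons x pre ih => intro acc v rep; simp [ih acc v rep]

lemma low_getD : ∀ (pre rest : List Int) (j : Nat), j < pre.length →
    (pre ++ rest).getD j 0 = pre.getD j 0 := by
  intro pre
  induction pre with
  | nil => intro rest j h; simp at h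
  | cons x pre ih =>
    intro rest j h
    cases j with
    | zero => rfl
    | succ j => simpa using ih rest j (by simpa using h)

lemma pyGetD_mid (pre : List Int) (acc : Int) (rep : List Int) :
    PySem.List.pyGetD (pre ++ acc :: rep) (pre.length : Int) 0 = acc := by
  rw [PySem.List.pyGetD_natCast, mid_getD]

lemma pySetD_mid (pre : List Int) (acc v : Int) (rep : List Int) :
    PySem.List.pySetD (pre ++ acc :: rep) (pre.length : Int) v = pre ++ v :: rep := by
  rw [PySem.List.pySetD_natCast, mid_set]

lemma pyGetD_low (pre rest : List Int) (j : Nat) (h : j < pre.length) :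
    PySem.List.pyGetD (pre ++ rest) (j : Int) 0 = pre.getD j 0 := by
  rw [PySem.List.pyGetD_natCast, low_getD _ _ _ h]

-- inner loop of A over the block lengths, acting on the cell at index k+1
lemma innerA (lst0 : List Int) (k : Nat) (rep : List Int) :
    ∀ (l : List Int), (∀ m ∈ l, 1 ≤ m) → ∀ acc : Int,
    l.foldl (fun nw m =>
        if m ≤ (k : Int) + 1 then
          PySem.List.pySetD nw ((k : Int) + 1)
            (PySem.List.pyGetD nw ((k : Int) + 1) 0 + PySem.List.pyGetD nw (((k : Int) + 1) - m) 0)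
        else nw)
      ((List.range (k + 1)).map (g lst0) ++ acc :: rep)
    = (List.range (k + 1)).map (g lst0) ++
        (acc + (l.map (fun m => if 1 ≤ m ∧ m ≤ (k : Int) + 1 then g lst0 (k + 1 - m.toNat) else 0)).sum) :: rep := by
  intro l
  induction l with
  | nil => intro _ acc; simp
  | cons m l ih =>
    intro hml acc
    have hm1 : (1 : Int) ≤ m := hml m (List.mem_cons_self ..)
    have hlen : ((List.range (k + 1)).map (g lst0)).length = k + 1 := by simp
    have hcast : ((k : Int) + 1) = (((k + 1 : Nat)) : Int) := by push_cast; ring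
    rw [List.foldl_cons]
    by_cases h : m ≤ (k : Int) + 1
    · rw [if_pos h]
      have hget1 : PySem.List.pyGetD ((List.range (k + 1)).map (g lst0) ++ acc :: rep) ((k : Int) + 1) 0 = acc := by
        have h0 := pyGetD_mid ((List.range (k + 1)).map (g lst0)) acc rep
        rw [hlen] at h0
        rw [hcast]; exact h0
      have hj : (((k : Int) + 1) - m) = ((k + 1 - m.toNat : Nat) : Int) := by omega
      have hget2 : PySem.List.pyGetD ((List.range (k + 1)).map (g lst0) ++ acc :: rep) (((k : Int) + 1) - m) 0
          = g lst0 (k + 1 - m.toNat) := by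
        rw [hj, pyGetD_low _ _ _ (by simpa using by omega), PySem.List.getD_map_range _ _ _ _ (by omega)]
      have hset : PySem.List.pySetD ((List.range (k + 1)).map (g lst0) ++ acc :: rep) ((k : Int) + 1)
            (acc + g lst0 (k + 1 - m.toNat)) = (List.range (k + 1)).map (g lst0) ++ (acc + g lst0 (k + 1 - m.toNat)) :: rep := by
        have h0 := pySetD_mid ((List.range (k + 1)).map (g lst0)) acc (acc + g lst0 (k + 1 - m.toNat)) rep
        rw [hlen] at h0
        rw [hcast]; exact h0
      rw [hget1, hget2, hset, ih (fun x hx => hml x (List.mem_cons_of_mem _ hx))]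
      rw [List.map_cons, List.sum_cons, if_pos ⟨hm1, h⟩]
      ring_nf
    · rw [if_neg h, ih (fun x hx => hml x (List.mem_cons_of_mem _ hx))]
      rw [List.map_cons, List.sum_cons, if_neg (by tauto)]
      ring_nf

lemma outerA (lst : List Int) (n : Int) (hn : 0 ≤ n) (hml : ∀ m ∈ lst, 1 ≤ m) :
    ∀ k : Nat, (k : Int) ≤ n →
    (PySem.List.pyRange 1 ((k : Int) + 1) 1).foldl
      (fun nw i =>
        lst.foldl (fun nw m =>
            if m ≤ i then
              PySem.List.pySetD nw i (PySem.List.pyGetD nw i 0 + PySem.List.pyGetD nw (i - m) 0)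
            else nw)
          (PySem.List.pySetD nw i (PySem.List.pyGetD nw i 0 + PySem.List.pyGetD nw (i - 1) 0)))
      (PySem.List.pySetD (List.replicate (n + 1).toNat (0 : Int)) 0 1)
    = (List.range (k + 1)).map (g lst) ++ List.replicate (n.toNat - k) 0 := by
  intro k
  induction k with
  | zero =>
    intro _
    rw [show ((0 : Nat) : Int) + 1 = 1 by norm_num, PySem.List.pyRange_one_eq_nil (le_refl 1),
      List.foldl_nil, PySem.List.pySetD_of_nonneg _ _ (by norm_num)]
    rw [show (n + 1).toNat = n.toNat + 1 by omega, List.replicate_succ]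
    simp [g, gTab]
  | succ k ih =>
    intro hk1
    have hk : (k : Int) ≤ n := by push_cast at hk1 ⊢; omega
    have hrep : n.toNat - k = (n.toNat - (k + 1)) + 1 := by omega
    rw [show ((k + 1 : Nat) : Int) + 1 = ((k : Int) + 1) + 1 by push_cast; ring,
      PySem.List.pyRange_one_succ_right (by omega), List.foldl_append, List.foldl_cons,
      List.foldl_nil, ih hk, hrep, List.replicate_succ]
    set pre := (List.range (k + 1)).map (g lst) with hpre
    set rep := List.replicate (n.toNat - (k + 1)) (0 : Int) with hrepdef
    have hlen : pre.length = k + 1 := by simp [hpre]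
    have hcast : ((k : Int) + 1) = (((k + 1 : Nat)) : Int) := by push_cast; ring
    have hget1 : PySem.List.pyGetD (pre ++ (0 : Int) :: rep) ((k : Int) + 1) 0 = 0 := by
      have h0 := pyGetD_mid pre 0 rep
      rw [hlen] at h0
      rw [hcast]; exact h0
    have hget2 : PySem.List.pyGetD (pre ++ (0 : Int) :: rep) (((k : Int) + 1) - 1) 0 = g lst k := by
      rw [show ((k : Int) + 1) - 1 = ((k : Nat) : Int) by ring,
        pyGetD_low _ _ _ (by omega), hpre, PySem.List.getD_map_range _ _ _ _ (by omega)]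
    have hset : PySem.List.pySetD (pre ++ (0 : Int) :: rep) ((k : Int) + 1) (0 + g lst k)
        = pre ++ (0 + g lst k) :: rep := by
      have h0 := pySetD_mid pre 0 (0 + g lst k) rep
      rw [hlen] at h0
      rw [hcast]; exact h0
    rw [hget1, hget2, hset, innerA lst k rep lst hml (0 + g lst k)]
    have hval : (0 : Int) + g lst k +
        (List.map (fun m => if 1 ≤ m ∧ m ≤ (k : Int) + 1 then g lst (k + 1 - m.toNat) else 0) lst).sum
        = g lst (k + 1) := by
      rw [g_succ]; unfold sTerm; ring
    rw [hval]
    simp [List.range_succ]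

lemma A_eq_g (lst : List Int) (n : Int) (hn : 0 ≤ n) (hml : ∀ m ∈ lst, 1 ≤ m) :
    counting_block_combinations n lst = g lst n.toNat := by
  obtain ⟨k, rfl⟩ : ∃ k : Nat, n = (k : Int) := ⟨n.toNat, by omega⟩
  unfold counting_block_combinations
  simp only []
  have h := outerA lst (k : Int) hn hml k (le_refl _)
  rw [h, show ((k : Int)).toNat - k = 0 by omega, List.replicate_zero, List.append_nil,
    PySem.List.pyGetD_natCast, PySem.List.getD_map_range _ _ _ _ (by omega),
    show ((k : Int)).toNat = k by omega]

-- ---- B side: the memo invariant ----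
def MemoInv (lst : List Int) (memo : PySem.Dict Int Int) : Prop :=
  ∀ k v, PySem.Dict.get? memo k = some v → 0 ≤ k ∧ v = g lst k.toNat

lemma memoInv_empty (lst : List Int) : MemoInv lst PySem.Dict.empty := by
  intro k v h
  rw [PySem.Dict.get?_empty] at h
  exact absurd h (by simp)

lemma memoInv_insert (lst : List Int) (memo : PySem.Dict Int Int) (i w : Int)
    (h : MemoInv lst memo) (hi : 0 ≤ i) (hw : w = g lst i.toNat) :
    MemoInv lst (PySem.Dict.insert memo i w) := by
  intro k v hk
  rw [PySem.Dict.get?_insert] at hk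
  by_cases hki : k = i
  · rw [if_pos hki] at hk
    exact ⟨hki ▸ hi, by injection hk with h'; rw [← h', hw, hki]⟩
  · rw [if_neg hki] at hk
    exact h k v hk

-- f computes g and preserves the memo invariant (induction on the fuel;
-- inside Pre_ every recursive call has i strictly smaller and fuel > i)
lemma fMemo_correct (lst : List Int) (hml : ∀ m ∈ lst, 1 ≤ m) :
    ∀ (fuel : Nat) (i : Int) (memo : PySem.Dict Int Int), MemoInv lst memo →
      0 ≤ i → i.toNat < fuel →
      (fMemo lst fuel i memo).1 = g lst i.toNat ∧ MemoInv lst (fMemo lst fuel i memo).2 := by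
  intro fuel
  induction fuel with
  | zero => intro i memo _ _ h; omega
  | succ fuel ih =>
    intro i memo hInv hi hfi
    by_cases hi0 : i = 0
    · subst hi0
      simp only [fMemo]
      exact ⟨by simp [g, gTab], hInv⟩
    · have hi1 : 1 ≤ i := by omega
      simp only [fMemo, if_neg hi0]
      cases hget : PySem.Dict.get? memo i with
      | some v =>
        simp only []
        obtain ⟨_, hv⟩ := hInv i v hget
        exact ⟨hv, hInv⟩
      | none =>
        simp only []
        obtain ⟨hp1, hp2⟩ := ih (i - 1) memo hInv (by omega) (by omega)
        -- inner fold over the block lengths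
        have hfold : ∀ (l : List Int), (∀ m ∈ l, 1 ≤ m) →
            ∀ (acc : Int) (d : PySem.Dict Int Int), MemoInv lst d →
            (l.foldl (fun (p : Int × PySem.Dict Int Int) m =>
                if m ≤ i then
                  let r := fMemo lst fuel (i - m) p.2
                  (p.1 + r.1, r.2)
                else p) (acc, d)).1
              = acc + (l.map (fun m => if m ≤ i then g lst (i - m).toNat else 0)).sum ∧
            MemoInv lst (l.foldl (fun (p : Int × PySem.Dict Int Int) m =>
                if m ≤ i then
                  let r := fMemo lst fuel (i - m) p.2
                  (p.1 + r.1, r.2)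
                else p) (acc, d)).2 := by
          intro l
          induction l with
          | nil => intro _ acc d hd; exact ⟨by simp, hd⟩
          | cons m l ihl =>
            intro hl acc d hd
            have hm1 : (1 : Int) ≤ m := hl m (List.mem_cons_self ..)
            have hl' : ∀ x ∈ l, (1 : Int) ≤ x := fun x hx => hl x (List.mem_cons_of_mem _ hx)
            rw [List.foldl_cons, List.map_cons, List.sum_cons]
            by_cases hmi : m ≤ i
            · simp only [if_pos hmi]
              obtain ⟨hr1, hr2⟩ := ih (i - m) d hd (by omega) (by omega)
              obtain ⟨hq1, hq2⟩ := ihl hl' (acc + (fMemo lst fuel (i - m) d).1) ((fMemo lst fuel (i - m) d).2) hr2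
              refine ⟨?_, hq2⟩
              rw [hq1, hr1]
              ring
            · simp only [if_neg hmi]
              obtain ⟨hq1, hq2⟩ := ihl hl' acc d hd
              refine ⟨?_, hq2⟩
              rw [hq1]
              ring
        obtain ⟨hq1, hq2⟩ := hfold lst hml (fMemo lst fuel (i - 1) memo).1 (fMemo lst fuel (i - 1) memo).2 hp2
        have hval : (fMemo lst fuel (i - 1) memo).1
              + (lst.map (fun m => if m ≤ i then g lst (i - m).toNat else 0)).sum
            = g lst i.toNat := by
          rw [hp1]
          obtain ⟨k, hk⟩ : ∃ k : Nat, i = (k : Int) + 1 := ⟨(i - 1).toNat, by omega⟩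
          subst hk
          rw [show (((k : Int) + 1) - 1).toNat = k by omega,
            show (((k : Int) + 1)).toNat = k + 1 by omega, g_succ]
          unfold sTerm
          have hmaps : (lst.map (fun m => if m ≤ (k : Int) + 1 then g lst (((k : Int) + 1) - m).toNat else 0))
              = (lst.map (fun m => if 1 ≤ m ∧ m ≤ (k : Int) + 1 then g lst (k + 1 - m.toNat) else 0)) := by
            apply List.map_congr_left
            intro m hm
            have hm1 : (1 : Int) ≤ m := hml m hm
            by_cases h : m ≤ (k : Int) + 1
            · rw [if_pos h, if_pos ⟨hm1, h⟩, show (((k : Int) + 1) - m).toNat = k + 1 - m.toNat by omega]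
            · rw [if_neg h, if_neg (by tauto)]
          rw [hmaps]
        constructor
        · simpa only [hq1] using hval
        · exact memoInv_insert lst _ i _ hq2 hi (by simpa only [hq1] using hval)

lemma warm_inv (lst : List Int) (hml : ∀ m ∈ lst, 1 ≤ m) :
    ∀ (js : List Int), (∀ j ∈ js, 0 ≤ j) →
    ∀ (memo : PySem.Dict Int Int), MemoInv lst memo →
    MemoInv lst (js.foldl (fun memo j => (fMemo lst (j.toNat + 1) j memo).2) memo) := by
  intro js
  induction js with
  | nil => intro _ memo h; exact h
  | cons j js ihj =>
    intro hjs memo h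
    rw [List.foldl_cons]
    exact ihj (fun x hx => hjs x (List.mem_cons_of_mem _ hx))
      _ (fMemo_correct lst hml (j.toNat + 1) j memo h (hjs j (List.mem_cons_self ..)) (by omega)).2

lemma B_eq_g (lst : List Int) (n : Int) (hn : 0 ≤ n) (hml : ∀ m ∈ lst, 1 ≤ m) :
    counting_block_combinations_alt n lst = g lst n.toNat := by
  unfold counting_block_combinations_alt
  simp only []
  have hwarm : MemoInv lst ((PySem.List.pyRange 0 (n + 1) 400).foldl
      (fun memo j => (fMemo lst (j.toNat + 1) j memo).2) PySem.Dict.empty) := by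
    apply warm_inv lst hml
    · intro j hj
      exact ((PySem.List.mem_pyRange_iff_of_pos (by norm_num) j).mp hj).1
    · exact memoInv_empty lst
  exact (fMemo_correct lst hml (n.toNat + 1) n _ hwarm hn (by omega)).1

lemma AB_zero (lst : List Int) :
    counting_block_combinations 0 lst = counting_block_combinations_alt 0 lst := by
  unfold counting_block_combinations counting_block_combinations_alt
  simp only []
  rw [show (0 : Int) + 1 = 1 by ring, PySem.List.pyRange_one_eq_nil (le_refl 1), List.foldl_nil]
  have hr : PySem.List.pyRange 0 1 400 = [0] := by decide
  rw [hr, List.foldl_cons, List.foldl_nil]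
  simp [fMemo, PySem.List.pySetD_of_nonneg, PySem.List.pyGetD]

-- ===== VERDICT (by name: the statement is the Claim_ definition above) =====
theorem counting_block_combinations_spec : Claim_equal_counting_block_combinations := by
  intro n lst _ hp
  rcases hp with ⟨hn, hp⟩
  unfold Spec_counting_block_combinations
  rcases hp with rfl | hml
  · exact AB_zero lst
  · rw [A_eq_g lst n hn hml, B_eq_g lst n hn hml]
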